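-- pv_equiv track=rewrite | github.com/arpanauts/biomapper | data/kraken_mapping/demographics/israeli10k_to_kraken_to_convert_to_biomapper/01_load_israeli10k_demographics.py | add_population_notes
-- ===== SOURCE A (Python) =====
-- def add_population_notes(row):
--     """Add population-specific notes for Israeli10K demographics."""
--     field_name = str(row['field_name']).lower()
--
--     notes = []
--
--     # Israeli-specific fields
--     if 'aliya' in field_name:
--         notes.append("Israeli immigration-specific field (year of aliyah)")
--
--     if 'country_of_birth' in field_name or 'birth_land' in field_name:
--         notes.append("May include Hebrew text; diverse immigrant population")
--
--     # Collection considerations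
--     if 'timezone' in field_name:
--         notes.append("Israel Standard Time (IST/IDT)")
--
--     # Physical measurements in diverse population
--     if any(term in field_name for term in ['circumference', 'bmi', 'weight', 'height']):
--         notes.append("Measured in diverse Middle Eastern population")
--
--     # Return concatenated notes or empty string
--     return "; ".join(notes) if notes else ""
-- ===== SOURCE B (Python) =====
-- _TERMS = [
--     ["aliya"],
--     ["country_of_birth", "birth_land"],
--     ["timezone"],
--     ["circumference", "bmi", "weight", "height"],
-- ]
-- _NOTES = [
--     "Israeli immigration-specific field (year of aliyah)",
--     "May include Hebrew text; diverse immigrant population",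
--     "Israel Standard Time (IST/IDT)",
--     "Measured in diverse Middle Eastern population",
-- ]
-- # All 16 possible answers, precomputed once: entry m joins the notes whose bit is set in m.
-- _TABLE = ["; ".join(n for i, n in enumerate(_NOTES) if m // 2**i % 2) for m in range(16)]
--
--
-- def add_population_notes(row):
--     """Add population-specific notes for Israeli10K demographics (bitmask + lookup table)."""
--     field_name = str(row['field_name']).lower()
--     mask = sum(2**i for i, terms in enumerate(_TERMS)
--                if any(t in field_name for t in terms))
--     return _TABLE[mask]
-- ===== Notes on version B (the rewrite author's own statement) =====
-- stated objective: alternative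
-- what changed: B computes a 4-bit match mask over the four term groups and returns the answer from a table of all 16 possible note strings precomputed at import time, instead of A's if-ladder that accumulates a notes list and joins it per call.
import Mathlib
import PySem

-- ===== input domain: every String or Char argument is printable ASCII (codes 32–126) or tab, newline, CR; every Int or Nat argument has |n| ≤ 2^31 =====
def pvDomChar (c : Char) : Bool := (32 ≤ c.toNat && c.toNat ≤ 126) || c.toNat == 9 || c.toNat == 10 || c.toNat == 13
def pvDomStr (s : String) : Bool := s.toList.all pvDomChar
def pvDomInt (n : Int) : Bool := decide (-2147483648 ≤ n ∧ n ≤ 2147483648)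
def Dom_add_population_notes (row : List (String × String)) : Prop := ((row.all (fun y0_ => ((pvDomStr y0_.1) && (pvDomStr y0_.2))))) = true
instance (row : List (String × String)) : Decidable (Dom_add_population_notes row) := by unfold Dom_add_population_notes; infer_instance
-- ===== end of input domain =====

-- ===== PORT A =====
-- B replaces A's note-list accumulation + join by a 4-bit match mask indexing a
-- precomputed table of all 16 answers; proven equal on Pre_ (key present).
def add_population_notes (row : List (String × String)) : String :=
  match (PySem.Dict.mk row).get? "field_name" with
  | none => ""  -- unreachable under Pre_ (Python raises KeyError here)
  | some v =>
    let field_name := PySem.Str.lower v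
    let notes : List String := []
    let notes := if PySem.Str.isIn "aliya" field_name then
        notes ++ ["Israeli immigration-specific field (year of aliyah)"] else notes
    let notes := if PySem.Str.isIn "country_of_birth" field_name || PySem.Str.isIn "birth_land" field_name then
        notes ++ ["May include Hebrew text; diverse immigrant population"] else notes
    let notes := if PySem.Str.isIn "timezone" field_name then
        notes ++ ["Israel Standard Time (IST/IDT)"] else notes
    let notes := if ["circumference", "bmi", "weight", "height"].any (fun t => PySem.Str.isIn t field_name) then
        notes ++ ["Measured in diverse Middle Eastern population"] else notes
    if notes.isEmpty then "" else PySem.Str.join "; " notes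

-- ===== PORT B =====
def pvTerms : List (List String) :=
  [["aliya"],
   ["country_of_birth", "birth_land"],
   ["timezone"],
   ["circumference", "bmi", "weight", "height"]]

def pvNotes : List String :=
  ["Israeli immigration-specific field (year of aliyah)",
   "May include Hebrew text; diverse immigrant population",
   "Israel Standard Time (IST/IDT)",
   "Measured in diverse Middle Eastern population"]

-- _TABLE: all 16 precomputed answers.  'i.toNat' in '2**i': exact, enumerate indices are ≥ 0.
def pvTable : List String :=
  (PySem.List.pyRange 0 16 1).map (fun m =>
    PySem.Str.join "; "
      (((PySem.List.enumerate pvNotes).filter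
          (fun p => PySem.Int.mod (PySem.Int.floordiv m (2 ^ p.1.toNat)) 2 != 0)).map Prod.snd))

def add_population_notes_alt (row : List (String × String)) : String :=
  match (PySem.Dict.mk row).get? "field_name" with
  | none => ""  -- unreachable under Pre_ (Python raises KeyError here)
  | some v =>
    let field_name := PySem.Str.lower v
    let mask : Int :=
      (((PySem.List.enumerate pvTerms).filter
          (fun p => p.2.any (fun t => PySem.Str.isIn t field_name))).map
        (fun p => (2 : Int) ^ p.1.toNat)).sum
    match PySem.List.pyGet? pvTable mask with
    | some s => s
    | none => ""  -- unreachable: 0 ≤ mask < 16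

-- ===== PRECONDITION & SPEC =====
-- Pre_ excludes rows without a "field_name" key, on which both Pythons raise KeyError.
def Pre_add_population_notes (row : List (String × String)) : Prop :=
  "field_name" ∈ row.map Prod.fst
instance (row : List (String × String)) : Decidable (Pre_add_population_notes row) := by unfold Pre_add_population_notes; infer_instance
def pvWitness_add_population_notes : (List (String × String)) := [("field_name", "bmi")]
def Spec_add_population_notes (row : List (String × String)) (out : String) : Prop := out = add_population_notes_alt row
instance (row : List (String × String)) (out : String) : Decidable (Spec_add_population_notes row out) := by unfold Spec_add_population_notes; infer_instance

-- ===== CLAIM (what is proved, stated in full; the proofs are below) =====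
def Claim_equal_add_population_notes : Prop := ∀ (row : List (String × String)), Dom_add_population_notes row → Pre_add_population_notes row → Spec_add_population_notes row (add_population_notes row)

-- ===== LEMMAS AND PROOFS =====
theorem pv_bodies_eq (v : String) :
    add_population_notes [("field_name", v)] = add_population_notes_alt [("field_name", v)] := by
  simp only [add_population_notes, add_population_notes_alt, pvTerms,
    PySem.Dict.get?_mk_cons, PySem.List.enumerate_cons, PySem.List.enumerate_nil,
    List.filter_cons, List.filter_nil, List.any_cons, List.any_nil,
    Bool.or_false, BEq.rfl, if_pos]
  generalize PySem.Str.isIn "aliya" (PySem.Str.lower v) = c1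
  generalize (PySem.Str.isIn "country_of_birth" (PySem.Str.lower v) || PySem.Str.isIn "birth_land" (PySem.Str.lower v)) = c2
  generalize PySem.Str.isIn "timezone" (PySem.Str.lower v) = c3
  generalize (PySem.Str.isIn "circumference" (PySem.Str.lower v) || (PySem.Str.isIn "bmi" (PySem.Str.lower v) || (PySem.Str.isIn "weight" (PySem.Str.lower v) || PySem.Str.isIn "height" (PySem.Str.lower v)))) = c4
  cases c1 <;> cases c2 <;> cases c3 <;> cases c4 <;> rfl

theorem pv_both_via_get? (row : List (String × String)) (v : String)
    (h : (PySem.Dict.mk row).get? "field_name" = some v) :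
    add_population_notes row = add_population_notes_alt row := by
  have hv : (PySem.Dict.mk [("field_name", v)]).get? "field_name" = some v := by
    simp [PySem.Dict.get?_mk_cons]
  have hb := pv_bodies_eq v
  unfold add_population_notes add_population_notes_alt at hb ⊢
  rw [h]
  rw [hv] at hb
  exact hb

theorem pv_get?_of_pre (row : List (String × String)) (hPre : Pre_add_population_notes row) :
    ∃ v, (PySem.Dict.mk row).get? "field_name" = some v := by
  induction row with
  | nil => simp [Pre_add_population_notes] at hPre
  | cons p rest ih =>
    obtain ⟨k, w⟩ := p
    by_cases hp : k = "field_name"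
    · subst hp
      exact ⟨w, by rw [PySem.Dict.get?_mk_cons]; simp⟩
    · have hPre' : Pre_add_population_notes rest := by
        simp only [Pre_add_population_notes, List.map_cons, List.mem_cons] at hPre ⊢
        rcases hPre with h | h
        · exact absurd h.symm hp
        · exact h
      obtain ⟨v, hv⟩ := ih hPre'
      refine ⟨v, ?_⟩
      rw [PySem.Dict.get?_mk_cons, if_neg (by simp [hp]), hv]

-- ===== VERDICT (by name: the statement is the Claim_ definition above) =====
theorem add_population_notes_spec : Claim_equal_add_population_notes := by
  intro row _hDom hPre
  unfold Spec_add_population_notes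
  obtain ⟨v, hv⟩ := pv_get?_of_pre row hPre
  exact pv_both_via_get? row v hv
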